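-- pv_equiv track=rewrite | github.com/Tyger375/CompressionAlgorithm | src/huffman_algorithm.py | scale_dict
-- ===== SOURCE A (Python) =====
-- def scale_dict(original_dict: dict):
--     m = max(min(original_dict.values()) - 1, 0)
--     for k in original_dict.keys():
--         original_dict[k] -= m
--     # Extract the frequencies
--     # Extract unique frequencies and sort them
--     unique_frequencies = sorted(set(original_dict.values()))
--
--     # Create a mapping from original frequencies to new smaller values
--     frequency_mapping = {freq: i + 1 for i, freq in enumerate(unique_frequencies)}
--
--     # Create the new dictionary with the mapped frequencies
--     scaled_dict = {key: frequency_mapping[value] for key, value in original_dict.items()}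
--
--     return scaled_dict
-- ===== SOURCE B (Python) =====
-- def scale_dict(original_dict: dict):
--     m = max(min(original_dict.values()) - 1, 0)
--     rank = {}
--     r = 0
--     prev = None
--     for k, v in sorted(original_dict.items(), key=lambda kv: kv[1]):
--         original_dict[k] = v - m  # same in-place rescaling as the original
--         if prev != v:
--             r += 1
--             prev = v
--         rank[k] = r
--     return {k: rank[k] for k in original_dict}
-- ===== Notes on version B (the rewrite author's own statement) =====
-- stated objective: alternative
-- what changed: Instead of building set(values), sorting it and materialising a freq->rank mapping dict, B sorts the items by value once and walks them with a running rank counter that increments only when the value strictly grows, writing key->rank directly; the same in-place rescaling of original_dict is kept.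
import Mathlib
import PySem

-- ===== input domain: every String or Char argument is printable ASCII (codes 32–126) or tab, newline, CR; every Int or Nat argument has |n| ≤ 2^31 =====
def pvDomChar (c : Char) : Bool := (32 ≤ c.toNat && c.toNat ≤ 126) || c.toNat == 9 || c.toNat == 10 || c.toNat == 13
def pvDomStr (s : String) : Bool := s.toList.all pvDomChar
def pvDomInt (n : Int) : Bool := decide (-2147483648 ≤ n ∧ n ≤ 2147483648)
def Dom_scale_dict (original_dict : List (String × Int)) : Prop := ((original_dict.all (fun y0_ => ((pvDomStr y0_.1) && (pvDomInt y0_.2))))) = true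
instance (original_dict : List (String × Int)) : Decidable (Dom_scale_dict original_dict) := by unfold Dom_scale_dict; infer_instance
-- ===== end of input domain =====

-- B replaces A's set/sort/enumerate frequency table by one sorted walk with a running rank counter
-- (return-value equivalence; both Pythons also perform the same in-place rescaling of original_dict).

-- B replaces A's set/sort/enumerate frequency table by a single sorted walk with a running rank counter
-- (equivalence is about the RETURN value; both Pythons perform the same in-place rescaling of original_dict).

-- ===== PORT A =====
def scale_dict (original_dict : List (String × Int)) : List (String × Int) :=
  match PySem.List.min? (original_dict.map Prod.snd) (fun v => v) with
  | none => []
  | some mn =>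
    let m : Int := max (mn - 1) 0
    let d1 := original_dict.map (fun p => (p.1, p.2 - m))
    let uniq := PySem.List.sorted (PySem.Set.ofList (d1.map Prod.snd)) (fun v => v) false
    let fm := (PySem.List.enumerate uniq 0).foldl
        (fun acc q => acc.insert q.2 (q.1 + 1)) (PySem.Dict.empty (κ := Int) (ν := Int))
    ((d1.foldl (fun acc p => acc.insert p.1 (fm.getD p.2 0))
        (PySem.Dict.empty (κ := String) (ν := Int)))).items

-- ===== PORT B =====
-- loop body of B's single sorted pass: state = (rank dict, running rank r, prev value)
def pvStepB (st : PySem.Dict String Int × Int × Option Int) (p : String × Int) :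
    PySem.Dict String Int × Int × Option Int :=
  if st.2.2 ≠ some p.2 then (st.1.insert p.1 (st.2.1 + 1), st.2.1 + 1, some p.2)
  else (st.1.insert p.1 st.2.1, st.2.1, st.2.2)

def scale_dict_alt (original_dict : List (String × Int)) : List (String × Int) :=
  match PySem.List.min? (original_dict.map Prod.snd) (fun v => v) with
  | none => []
  | some mn =>
    let _m : Int := max (mn - 1) 0
    let s := PySem.List.sorted original_dict (fun p => p.2) false
    let st := s.foldl pvStepB
        (PySem.Dict.empty (κ := String) (ν := Int), (0 : Int), (none : Option Int))
    (original_dict.foldl (fun acc p => acc.insert p.1 (st.1.getD p.1 0))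
        (PySem.Dict.empty (κ := String) (ν := Int))).items

-- ===== PRECONDITION & SPEC =====
-- Pre_ excludes the empty list (min() of an empty dict raises ValueError) and lists with a
-- duplicated key, which do not represent any Python dict input (a dict cannot hold a key twice).
def Pre_scale_dict (original_dict : List (String × Int)) : Prop :=
  original_dict ≠ [] ∧ (original_dict.map Prod.fst).Nodup
instance (original_dict : List (String × Int)) : Decidable (Pre_scale_dict original_dict) := by
  unfold Pre_scale_dict; infer_instance
def pvWitness_scale_dict : (List (String × Int)) := [("a", 3), ("b", 1)]

def Spec_scale_dict (original_dict : List (String × Int)) (out : List (String × Int)) : Prop :=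
  out = scale_dict_alt original_dict
instance (original_dict : List (String × Int)) (out : List (String × Int)) :
    Decidable (Spec_scale_dict original_dict out) := by unfold Spec_scale_dict; infer_instance

-- ===== CLAIM (what is proved, stated in full; the proofs are below) =====
def Claim_equal_scale_dict : Prop := ∀ (original_dict : List (String × Int)),
  Dom_scale_dict original_dict → Pre_scale_dict original_dict →
  Spec_scale_dict original_dict (scale_dict original_dict)

-- ===== LEMMAS AND PROOFS =====

-- the common canonical value: rank of v = 1 + number of DISTINCT values strictly below v
def pvRank (vals : List Int) (v : Int) : Int :=
  ((PySem.Set.ofList vals).countP (fun u => decide (u < v)) : Int) + 1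

theorem countP_ofList_congr (l1 l2 : List Int) (h : ∀ u, u ∈ l1 ↔ u ∈ l2) (p : Int → Bool) :
    (PySem.Set.ofList l1).countP p = (PySem.Set.ofList l2).countP p := by
  refine List.Perm.countP_eq _ ?_
  rw [List.perm_ext_iff_of_nodup (PySem.Set.nodup_ofList l1) (PySem.Set.nodup_ofList l2)]
  intro a
  simp [PySem.Set.mem_ofList, h]

theorem countP_ofList_cons (p : Int → Bool) (x : Int) (tv : List Int) :
    (PySem.Set.ofList (x :: tv)).countP p
      = (if p x then 1 else 0) + (PySem.Set.ofList tv).countP (fun u => p u && decide (u ≠ x)) := by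
  rw [PySem.Set.ofList_cons, List.countP_cons]
  have h1 : (PySem.Set.discard (PySem.Set.ofList tv) x).countP p
      = (PySem.Set.ofList tv).countP (fun u => p u && decide (u ≠ x)) := by
    have hperm : (PySem.Set.discard (PySem.Set.ofList tv) x).Perm
        ((PySem.Set.ofList tv).filter (fun u => decide (u ≠ x))) := by
      rw [List.perm_ext_iff_of_nodup
        (PySem.Set.nodup_discard (PySem.Set.ofList tv) x (PySem.Set.nodup_ofList tv))
        ((PySem.Set.nodup_ofList tv).filter _)]
      intro a
      simp [PySem.Set.mem_discard, List.mem_filter]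
    rw [hperm.countP_eq, List.countP_filter]
  omega

-- in a strictly increasing list, the index of an element = the number of smaller elements
theorem countP_lt_getElem (U : List Int) (hU : U.Pairwise (· < ·)) (i : Nat) (h : i < U.length) :
    U.countP (fun u => decide (u < U[i])) = i := by
  induction U generalizing i with
  | nil => simp at h
  | cons x t ih =>
    rcases List.pairwise_cons.1 hU with ⟨hx, ht⟩
    cases i with
    | zero =>
      simp only [List.getElem_cons_zero]
      rw [List.countP_eq_zero]
      intro a ha
      rcases List.mem_cons.1 ha with rfl | hat
      · simp
      · simp only [decide_eq_true_eq]
        exact not_lt.2 (le_of_lt (hx a hat))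
    | succ j =>
      simp only [List.getElem_cons_succ, List.countP_cons]
      have hj : j < t.length := by simpa using h
      have hx' : x < t[j] := hx _ (List.getElem_mem hj)
      simp only [hx', if_pos, decide_true]
      exact congrArg (fun n => n + 1) (ih ht j hj)

-- over a nodup list containing v, the (≤ v)-count is the (< v)-count plus one
theorem countP_le_eq_lt_succ (S : List Int) (hS : S.Nodup) (v : Int) (hv : v ∈ S) :
    S.countP (fun u => decide (u ≤ v)) = S.countP (fun u => decide (u < v)) + 1 := by
  induction S with
  | nil => simp at hv
  | cons x t ih =>
    rcases List.nodup_cons.1 hS with ⟨hxt, hnt⟩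
    simp only [List.countP_cons]
    rcases List.mem_cons.1 hv with rfl | hvt
    · have h1 : t.countP (fun u => decide (u ≤ v)) = t.countP (fun u => decide (u < v)) := by
        apply List.countP_congr
        intro u hu
        have hne : u ≠ v := fun e => hxt (e ▸ hu)
        simp [le_iff_lt_or_eq, hne]
      simp [h1]
    · have hxv : x ≠ v := fun e => absurd (e ▸ hvt) hxt
      rw [ih hnt hvt]
      by_cases hlt : x < v
      · simp [hlt, le_of_lt hlt]
      · have h2 : ¬ x ≤ v := fun hle => hlt (lt_of_le_of_ne hle hxv)
        simp [hlt, h2]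

-- B's scan writes only keys of t: getD at any other key is unchanged
theorem scan_getD_not_mem (t : List (String × Int)) :
    ∀ (st : PySem.Dict String Int × Int × Option Int) (k : String),
    (∀ p ∈ t, p.1 ≠ k) → (t.foldl pvStepB st).1.getD k 0 = st.1.getD k 0 := by
  induction t with
  | nil => intro st k _; rfl
  | cons p0 t ih =>
    intro st k hk
    rw [List.foldl_cons, ih _ k (fun p hp => hk p (List.mem_cons_of_mem _ hp))]
    have hne : k ≠ p0.1 := (hk p0 (List.mem_cons_self)).symm
    unfold pvStepB
    split_ifs <;> simp [PySem.Dict.getD_insert_of_ne, hne]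

-- B's scan invariant: the rank recorded for (k, v) counts the distinct values ≤ v (not matching prev)
theorem scan_getD (s : List (String × Int)) :
    ∀ (d : PySem.Dict String Int) (r : Int) (prev : Option Int),
    s.Pairwise (fun p q => p.2 ≤ q.2) →
    (s.map Prod.fst).Nodup →
    (∀ pv, prev = some pv → ∀ p ∈ s, pv ≤ p.2) →
    ∀ k v, (k, v) ∈ s →
    (s.foldl pvStepB (d, r, prev)).1.getD k 0
      = r + ((PySem.Set.ofList (s.map Prod.snd)).countP
          (fun u => decide (u ≤ v) && decide (some u ≠ prev)) : Int) := by
  induction s with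
  | nil => intro _ _ _ _ _ _ k v h; simp at h
  | cons p0 t ih =>
    obtain ⟨k0, v0⟩ := p0
    intro d r prev hsort hnd hprev k v hmem
    rcases List.pairwise_cons.1 hsort with ⟨hv0, hsortt⟩
    have hv0' : ∀ q ∈ t, v0 ≤ q.2 := by simpa using hv0
    rw [List.map_cons] at hnd
    rcases List.nodup_cons.1 hnd with ⟨hk0t, hndt⟩
    rw [List.foldl_cons]
    simp only [List.map_cons]
    rw [countP_ofList_cons]
    rcases List.mem_cons.1 hmem with heq | hmemt
    · -- (k, v) is the head element
      have hkk : k = k0 := congrArg Prod.fst heq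
      have hvv : v = v0 := congrArg Prod.snd heq
      subst hkk; subst hvv
      have hnot : ∀ p ∈ t, p.1 ≠ k := by
        intro p hp he
        have hm : p.1 ∈ List.map Prod.fst t := List.mem_map_of_mem hp
        rw [he] at hm
        exact hk0t hm
      rw [scan_getD_not_mem t _ k hnot]
      have hz : (PySem.Set.ofList (t.map Prod.snd)).countP
          (fun u => (decide (u ≤ v) && decide (some u ≠ prev)) && decide (u ≠ v)) = 0 := by
        rw [List.countP_eq_zero]
        intro u hu
        rcases List.mem_map.1 ((PySem.Set.mem_ofList _ _).1 hu) with ⟨q, hq, rfl⟩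
        have hle : v ≤ q.2 := hv0' q hq
        simp only [Bool.and_eq_true, decide_eq_true_eq]
        rintro ⟨⟨h1, _⟩, h3⟩
        exact h3 (le_antisymm h1 hle)
      rw [hz]
      by_cases hpv : prev = some v
      · have hstep : pvStepB (d, r, prev) (k, v) = (d.insert k r, r, prev) := by
          simp [pvStepB, hpv]
        rw [hstep]
        simp [hpv, PySem.Dict.getD_insert_self]
      · have hstep : pvStepB (d, r, prev) (k, v) = (d.insert k (r + 1), r + 1, some v) := by
          simp [pvStepB, hpv]
        rw [hstep]
        have hone : (decide (v ≤ v) && decide (some v ≠ prev)) = true := by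
          simp [Ne.symm hpv]
        rw [hone]
        simp [PySem.Dict.getD_insert_self]
    · -- (k, v) is in the tail
      have hvval : v0 ≤ v := hv0' (k, v) hmemt
      by_cases hpv : prev = some v0
      · have hstep : pvStepB (d, r, prev) (k0, v0) = (d.insert k0 r, r, prev) := by
          simp [pvStepB, hpv]
        rw [hstep]
        have hprev' : ∀ pv, prev = some pv → ∀ p ∈ t, pv ≤ p.2 := by
          intro pv he p hp
          rw [hpv] at he
          injection he with he
          exact he ▸ hv0' p hp
        rw [ih _ r prev hsortt hndt hprev' k v hmemt]
        have hcong : (PySem.Set.ofList (t.map Prod.snd)).countP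
              (fun u => (decide (u ≤ v) && decide (some u ≠ prev)) && decide (u ≠ v0))
            = (PySem.Set.ofList (t.map Prod.snd)).countP
              (fun u => decide (u ≤ v) && decide (some u ≠ prev)) := by
          apply List.countP_congr
          intro u _
          by_cases huv : u = v0
          · subst huv; simp [hpv]
          · simp [huv]
        rw [hcong]
        have hhead : (decide (v0 ≤ v) && decide (some v0 ≠ prev)) = false := by
          simp [hpv]
        rw [hhead]
        simp
      · have hstep : pvStepB (d, r, prev) (k0, v0) = (d.insert k0 (r + 1), r + 1, some v0) := by
          simp [pvStepB, hpv]
        rw [hstep]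
        have hprev' : ∀ pv, (some v0 : Option Int) = some pv → ∀ p ∈ t, pv ≤ p.2 := by
          intro pv he p hp
          injection he with he
          exact he ▸ hv0' p hp
        rw [ih _ (r + 1) (some v0) hsortt hndt hprev' k v hmemt]
        have hcong : (PySem.Set.ofList (t.map Prod.snd)).countP
              (fun u => (decide (u ≤ v) && decide (some u ≠ prev)) && decide (u ≠ v0))
            = (PySem.Set.ofList (t.map Prod.snd)).countP
              (fun u => decide (u ≤ v) && decide (some u ≠ some v0)) := by
          apply List.countP_congr
          intro u hu
          rcases List.mem_map.1 ((PySem.Set.mem_ofList _ _).1 hu) with ⟨q, hq, rfl⟩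
          by_cases huv : q.2 = v0
          · simp [huv]
          · have hprevne : some q.2 ≠ prev := by
              intro he
              cases hprevcase : prev with
              | none => rw [hprevcase] at he; simp at he
              | some pv =>
                have hpv0 : pv ≤ v0 := by
                  have := hprev pv hprevcase (k0, v0) List.mem_cons_self
                  simpa using this
                have hv0q : v0 ≤ q.2 := hv0' q hq
                rw [hprevcase] at he
                injection he with he
                exact huv (by omega)
            simp [huv, hprevne]
        rw [hcong]
        have hhead : (decide (v0 ≤ v) && decide (some v0 ≠ prev)) = true := by
          simp [hvval, Ne.symm hpv]
        rw [hhead]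
        simp only [if_true]
        push_cast
        omega

theorem scale_dict_alt_eq_canon (od : List (String × Int)) (hne : od ≠ [])
    (hnd : (od.map Prod.fst).Nodup) :
    scale_dict_alt od = od.map (fun p => (p.1, pvRank (od.map Prod.snd) p.2)) := by
  obtain ⟨q, hq⟩ : ∃ q, PySem.List.min? (od.map Prod.snd) (fun v => v) = some q := by
    cases h : PySem.List.min? (od.map Prod.snd) (fun v => v) with
    | none =>
      have := (PySem.List.min?_eq_none_iff (od.map Prod.snd) (fun v => v)).1 h
      simp at this
      exact absurd this hne
    | some q => exact ⟨q, rfl⟩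
  unfold scale_dict_alt
  rw [hq]
  dsimp only
  have hperm : (PySem.List.sorted od (fun p => p.2) false).Perm od := PySem.List.sorted_perm od _ false
  have hndk : ((PySem.List.sorted od (fun p => p.2) false).map Prod.fst).Nodup :=
    ((hperm.map Prod.fst).nodup_iff).2 hnd
  rw [PySem.Dict.items_foldl_insert_fresh od (fun p => p.1)
    (fun p => (List.foldl pvStepB (PySem.Dict.empty, 0, none)
        (PySem.List.sorted od (fun p => p.2) false)).1.getD p.1 0)
    PySem.Dict.empty (fun a _ => PySem.Dict.contains_empty (ν := Int) a.1) (by exact hnd)]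
  rw [show (PySem.Dict.empty (κ := String) (ν := Int)).items = [] from rfl, List.nil_append]
  refine List.map_congr_left (fun p hp => ?_)
  have hmem : (p.1, p.2) ∈ PySem.List.sorted od (fun p => p.2) false := by
    have := (PySem.List.mem_sorted (x := p) (xs := od) (key := fun p => p.2) (rev := false)).2 hp
    simpa using this
  rw [scan_getD (PySem.List.sorted od (fun p => p.2) false) PySem.Dict.empty 0 none
    (PySem.List.sorted_pairwise od (fun p => p.2)) hndk
    (by intro pv h; exact absurd h (by simp)) p.1 p.2 hmem]
  have hcong1 : (PySem.Set.ofList ((PySem.List.sorted od (fun p => p.2) false).map Prod.snd)).countP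
        (fun u => decide (u ≤ p.2) && decide (some u ≠ none))
      = (PySem.Set.ofList ((PySem.List.sorted od (fun p => p.2) false).map Prod.snd)).countP
        (fun u => decide (u ≤ p.2)) := by
    apply List.countP_congr
    intro u _
    simp
  rw [hcong1]
  rw [countP_ofList_congr ((PySem.List.sorted od (fun p => p.2) false).map Prod.snd) (od.map Prod.snd)
    (fun u => (hperm.map Prod.snd).mem_iff) (fun u => decide (u ≤ p.2))]
  rw [countP_le_eq_lt_succ (PySem.Set.ofList (od.map Prod.snd)) (PySem.Set.nodup_ofList _) p.2
    ((PySem.Set.mem_ofList _ _).2 (List.mem_map_of_mem hp))]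
  unfold pvRank
  push_cast
  rw [zero_add]

-- A's frequency_mapping lookup: position + 1 in a strictly increasing list
theorem fm_getD (U : List Int) (hU : U.Pairwise (· < ·)) (w : Int) (hw : w ∈ U) :
    ((PySem.List.enumerate U 0).foldl (fun acc q => acc.insert q.2 (q.1 + 1))
        (PySem.Dict.empty (κ := Int) (ν := Int))).getD w 0
      = (U.countP (fun u => decide (u < w)) : Int) + 1 := by
  have hnodup : U.Nodup := hU.imp (fun h => ne_of_lt h)
  have hitems : ((PySem.List.enumerate U 0).foldl (fun acc q => acc.insert q.2 (q.1 + 1))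
        (PySem.Dict.empty (κ := Int) (ν := Int))).items
      = (PySem.Dict.empty (κ := Int) (ν := Int)).items
        ++ (PySem.List.enumerate U 0).map (fun q => (q.2, q.1 + 1)) :=
    PySem.Dict.items_foldl_insert_fresh (PySem.List.enumerate U 0) (fun q => q.2)
      (fun q => q.1 + 1) PySem.Dict.empty
      (fun a _ => PySem.Dict.contains_empty (ν := Int) a.2)
      (by rw [PySem.List.map_snd_enumerate]; exact hnodup)
  have hkeys : ((PySem.List.enumerate U 0).foldl (fun acc q => acc.insert q.2 (q.1 + 1))
        (PySem.Dict.empty (κ := Int) (ν := Int))).keys.Nodup :=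
    PySem.Dict.nodup_keys_foldl_insert_key (PySem.List.enumerate U 0) (fun q => q.2)
      (fun _ q => q.1 + 1) PySem.Dict.empty (PySem.Dict.nodup_keys_empty)
  obtain ⟨i, hi, hw'⟩ := List.mem_iff_getElem.1 hw
  have hmem : (w, (i : Int) + 1) ∈ ((PySem.List.enumerate U 0).foldl
      (fun acc q => acc.insert q.2 (q.1 + 1)) (PySem.Dict.empty (κ := Int) (ν := Int))).items := by
    rw [hitems]
    refine List.mem_append_right _ (List.mem_map.2 ⟨((0 : Int) + i, U[i]), ?_, ?_⟩)
    · exact (PySem.List.mem_enumerate_iff _ _ _).2 ⟨i, hi, rfl⟩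
    · simp [hw']
  rw [PySem.Dict.getD_of_mem_items _ hmem hkeys 0]
  rw [← hw', countP_lt_getElem U hU i hi]

-- subtracting m from every value changes no strict comparison between values
theorem countP_ofList_map_sub (l : List Int) (m v : Int) :
    (PySem.Set.ofList (l.map (fun u => u - m))).countP (fun u => decide (u < v - m))
      = (PySem.Set.ofList l).countP (fun u => decide (u < v)) := by
  have hinj : Function.Injective (fun u : Int => u - m) := fun a b h => by
    simpa using congrArg (fun x => x + m) h
  have hperm : (PySem.Set.ofList (l.map (fun u => u - m))).Perm
      ((PySem.Set.ofList l).map (fun u => u - m)) := by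
    rw [List.perm_ext_iff_of_nodup (PySem.Set.nodup_ofList _)
      ((PySem.Set.nodup_ofList l).map hinj)]
    intro a
    simp [PySem.Set.mem_ofList]
  rw [hperm.countP_eq, List.countP_map]
  apply List.countP_congr
  intro u _
  have : (u - m < v - m) = (u < v) := by
    apply propext
    omega
  simp [this]

theorem scale_dict_eq_canon (od : List (String × Int)) (hne : od ≠ [])
    (hnd : (od.map Prod.fst).Nodup) :
    scale_dict od = od.map (fun p => (p.1, pvRank (od.map Prod.snd) p.2)) := by
  obtain ⟨q, hq⟩ : ∃ q, PySem.List.min? (od.map Prod.snd) (fun v => v) = some q := by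
    cases h : PySem.List.min? (od.map Prod.snd) (fun v => v) with
    | none =>
      have := (PySem.List.min?_eq_none_iff (od.map Prod.snd) (fun v => v)).1 h
      simp at this
      exact absurd this hne
    | some q => exact ⟨q, rfl⟩
  unfold scale_dict
  rw [hq]
  dsimp only
  rw [PySem.Dict.items_foldl_insert_fresh (od.map (fun p => (p.1, p.2 - max (q - 1) 0)))
    (fun p => p.1)
    (fun p => ((PySem.List.enumerate (PySem.List.sorted
        (PySem.Set.ofList ((od.map (fun p => (p.1, p.2 - max (q - 1) 0))).map Prod.snd))
        (fun v => v) false) 0).foldl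
        (fun acc q => acc.insert q.2 (q.1 + 1)) (PySem.Dict.empty (κ := Int) (ν := Int))).getD p.2 0)
    PySem.Dict.empty
    (fun a _ => PySem.Dict.contains_empty (ν := Int) a.1)
    (by simpa [List.map_map, Function.comp] using hnd)]
  rw [show (PySem.Dict.empty (κ := String) (ν := Int)).items = [] from rfl, List.nil_append]
  rw [List.map_map]
  refine List.map_congr_left (fun p hp => ?_)
  simp only [Function.comp]
  have hsnd : ((od.map (fun p => (p.1, p.2 - max (q - 1) 0))).map Prod.snd)
      = (od.map Prod.snd).map (fun u => u - max (q - 1) 0) := by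
    simp [List.map_map, Function.comp]
  rw [hsnd]
  have hw : p.2 - max (q - 1) 0 ∈ PySem.List.sorted
      (PySem.Set.ofList ((od.map Prod.snd).map (fun u => u - max (q - 1) 0)))
      (fun v => v) false := by
    rw [PySem.List.mem_sorted]
    rw [PySem.Set.mem_ofList]
    exact List.mem_map_of_mem (List.mem_map_of_mem hp)
  rw [fm_getD _ (PySem.List.sorted_ofList_pairwise_lt _) _ hw]
  rw [(PySem.List.sorted_perm _ _ _).countP_eq]
  rw [countP_ofList_map_sub (od.map Prod.snd) (max (q - 1) 0) p.2]
  rfl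

-- ===== VERDICT (by name: the statement is the Claim_ definition above) =====
theorem scale_dict_spec : Claim_equal_scale_dict := by
  intro od _ hpre
  unfold Spec_scale_dict
  rw [scale_dict_eq_canon od hpre.1 hpre.2, scale_dict_alt_eq_canon od hpre.1 hpre.2]
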